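-- pv_equiv track=rewrite | github.com/CollectorsObservatory/RecommendationAlgorithm | reseau_identifiants.py | calculer_scores_similarite
-- ===== SOURCE A (Python) =====
-- def initialiser_matrice_carre(n):
--     """
--        Crée une matrice de taille nxn, initialisée avec des zéros et retourne la matrice.
--
--        Args:
--            n (int): dimension de la matrice nxn
--
--        Returns:
--            matrice (list<list<int>>): matrice initialisée
--        """
--
--     matrice = []
--     for ligne in range(n):  # pour chacune des lignes dans n
--         matrice.append([])  # créer une ligne (liste) et l'initialiser à 0
--         for colonne in range(n):
--             matrice[ligne].append(0)  # ajouter un 0 pour chaque n colonne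
--     return matrice
--
-- def trouver_nombre_elements_communs_entre_listes(liste1, liste2):
--     """
--        Donne le nombre d'éléments communs entre deux listes
--
--        Args:
--            liste1 (list<int>): Une des deux listes
--            liste2 (list<int>): Une des deux listes
--
--        Returns:
--            int: Le nombre d'éléments communs entre les deux listes
--
--        """
--     # Conversion en set pour l'intersection et pour enlever la répetition
--     liste_elements_en_commun = set(liste1) & set(liste2)
--     return len(liste_elements_en_commun)
--
-- def calculer_scores_similarite(reseau):
--     """
--        Remplit la matrice de similarité. Dans cette matrice, l'élément en position i,j
--        donne le nombre d'amis communs entre les utilisateurs i et j.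
--        Cette matrice devrait être symétrique, c'est-à-dire que i a autant d'amis
--        communs avec j que j a d'amis communs avec i. Autrement dit, l'élément en position
--        i,j est égal à l'élément en position j,i.
--
--        Args:
--            reseau (list<list<int>>): liste contenant la liste des amis pour chaque usager
--
--        Returns:
--            list<list<int>>: la matrice de similarité
--
--        """
--     utilisateurs = len(reseau)  # Pour dire que la longeur de la liste reseau est le nombre d'usager de ce reseau
--     matrice_similarite = initialiser_matrice_carre(utilisateurs)  # initier la matrice
--     for ligne in range(utilisateurs):
--         for colone in range(ligne, utilisateurs):  # pour remplir la matrice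
--             amis_commun = trouver_nombre_elements_communs_entre_listes(reseau[ligne], reseau[colone])
--             matrice_similarite[ligne][colone] = amis_commun
--             matrice_similarite[colone][ligne] = amis_commun
--             # pour que la matrice soit carree , ligne = colone
--     return matrice_similarite
-- ===== SOURCE B (Python) =====
-- def calculer_scores_similarite(reseau):
--     # Inverted index friend -> users, then accumulate co-occurrence counts:
--     # never intersects two friend lists pairwise.
--     n = len(reseau)
--     index = {}
--     for u, amis in enumerate(reseau):
--         for f in dict.fromkeys(amis):
--             index[f] = index.get(f, []) + [u]
--     matrice = [[0] * n for _ in range(n)]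
--     for utilisateurs in index.values():
--         for i in utilisateurs:
--             for j in utilisateurs:
--                 matrice[i][j] += 1
--     return matrice
-- ===== Notes on version B (the rewrite author's own statement) =====
-- stated objective: faster
-- what changed: Replaces A's O(n^2) pairwise set intersections (upper triangle + mirrored writes into a preallocated matrix) by an inverted index friend->users built in one pass, then filling the matrix by co-occurrence increments over each friend's user list.
import Mathlib
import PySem

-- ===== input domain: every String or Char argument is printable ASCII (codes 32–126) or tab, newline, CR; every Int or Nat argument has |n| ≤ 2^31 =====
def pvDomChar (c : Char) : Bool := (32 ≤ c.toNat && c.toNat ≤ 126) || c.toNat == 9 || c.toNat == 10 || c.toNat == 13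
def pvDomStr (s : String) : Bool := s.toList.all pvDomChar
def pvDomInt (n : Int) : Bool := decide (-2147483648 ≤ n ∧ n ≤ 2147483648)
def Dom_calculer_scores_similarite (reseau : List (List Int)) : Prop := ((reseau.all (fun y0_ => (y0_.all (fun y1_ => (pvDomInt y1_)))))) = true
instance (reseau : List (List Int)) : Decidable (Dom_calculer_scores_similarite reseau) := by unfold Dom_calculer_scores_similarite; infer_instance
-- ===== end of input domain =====

-- B replaces A's pairwise set intersections over all (i, j) by an inverted index
-- friend -> list of users, then accumulates the matrix by co-occurrence increments
-- over each friend's user list, never intersecting two friend lists (objective: faster, measured).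

-- ===== PORT A =====
def initialiser_matrice_carre (n : Int) : List (List Int) :=
  (PySem.List.pyRange 0 n 1).foldl (fun matrice ligne =>
    let matrice := matrice ++ [([] : List Int)]      -- matrice.append([])
    (PySem.List.pyRange 0 n 1).foldl (fun m _colonne =>
      PySem.List.pySetD m ligne (PySem.List.pyGetD m ligne [] ++ [0]))  -- matrice[ligne].append(0)
      matrice) []

def trouver_nombre_elements_communs_entre_listes (liste1 liste2 : List Int) : Int :=
  PySem.Set.len (PySem.Set.inter (PySem.Set.ofList liste1) (PySem.Set.ofList liste2))

def calculer_scores_similarite (reseau : List (List Int)) : List (List Int) :=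
  let utilisateurs := PySem.List.len reseau
  let matrice_similarite := initialiser_matrice_carre utilisateurs
  (PySem.List.pyRange 0 utilisateurs 1).foldl (fun m ligne =>
    (PySem.List.pyRange ligne utilisateurs 1).foldl (fun m colone =>
      let amis_commun := trouver_nombre_elements_communs_entre_listes
        (PySem.List.pyGetD reseau ligne []) (PySem.List.pyGetD reseau colone [])
      let m := PySem.List.pySetD m ligne
        (PySem.List.pySetD (PySem.List.pyGetD m ligne []) colone amis_commun)
      PySem.List.pySetD m colone
        (PySem.List.pySetD (PySem.List.pyGetD m colone []) ligne amis_commun)) m) matrice_similarite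

-- ===== PORT B =====
-- inverted index friend -> ascending list of users having that friend; then
-- matrice[i][j] += 1 for every pair (i, j) of users sharing a friend.
def calculer_scores_similarite_alt (reseau : List (List Int)) : List (List Int) :=
  let n := PySem.List.len reseau
  let index := (PySem.List.enumerate reseau 0).foldl (fun d p =>
      (PySem.List.dedup p.2).foldl (fun d f =>
        d.insert f (d.getD f [] ++ [p.1])) d)      -- index[f] = index.get(f, []) + [u]
    (PySem.Dict.empty : PySem.Dict Int (List Int))
  let matrice := (PySem.List.pyRange 0 n 1).map (fun _ => List.replicate n.toNat 0)
  index.values.foldl (fun m utilisateurs =>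
    utilisateurs.foldl (fun m i =>
      utilisateurs.foldl (fun m j =>
        PySem.List.pySetD m i
          (PySem.List.pySetD (PySem.List.pyGetD m i []) j
            (PySem.List.pyGetD (PySem.List.pyGetD m i []) j 0 + 1))) m) m) matrice

-- ===== PRECONDITION & SPEC =====
def Spec_calculer_scores_similarite (reseau : List (List Int)) (out : List (List Int)) : Prop := out = calculer_scores_similarite_alt reseau
instance (reseau : List (List Int)) (out : List (List Int)) : Decidable (Spec_calculer_scores_similarite reseau out) := by unfold Spec_calculer_scores_similarite; infer_instance

-- ===== CLAIM (what is proved, stated in full; the proofs are below) =====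
def Claim_equal_calculer_scores_similarite : Prop := ∀ (reseau : List (List Int)), Dom_calculer_scores_similarite reseau → Spec_calculer_scores_similarite reseau (calculer_scores_similarite reseau)

-- ===== LEMMAS AND PROOFS =====

-- similarity value of the pair (i, j), as A computes it
def pvSim (reseau : List (List Int)) (i j : Nat) : Int :=
  PySem.Set.len (PySem.Set.inter (PySem.Set.ofList (reseau.getD i []))
                                 (PySem.Set.ofList (reseau.getD j [])))

-- the n×n matrix whose (i, j) entry is φ i j
def pvMat (n : Nat) (φ : Nat → Nat → Int) : List (List Int) :=
  (List.range n).map (fun i => (List.range n).map (fun j => φ i j))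

lemma pvSim_symm (reseau : List (List Int)) (i j : Nat) :
    pvSim reseau i j = pvSim reseau j i := by
  unfold pvSim
  have h : (PySem.Set.inter (PySem.Set.ofList (reseau.getD i []))
        (PySem.Set.ofList (reseau.getD j []))).Perm
      (PySem.Set.inter (PySem.Set.ofList (reseau.getD j []))
        (PySem.Set.ofList (reseau.getD i []))) := by
    rw [List.perm_ext_iff_of_nodup (PySem.Set.nodup_inter _ _ (PySem.Set.nodup_ofList _))
      (PySem.Set.nodup_inter _ _ (PySem.Set.nodup_ofList _))]
    intro x
    simp only [PySem.Set.mem_inter]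
    tauto
  simp only [PySem.Set.len]
  exact_mod_cast h.length_eq

lemma pvMat_congr (n : Nat) (φ ψ : Nat → Nat → Int)
    (h : ∀ a b, a < n → b < n → φ a b = ψ a b) : pvMat n φ = pvMat n ψ := by
  apply List.map_congr_left
  intro a ha
  apply List.map_congr_left
  intro b hb
  exact h a b (List.mem_range.mp ha) (List.mem_range.mp hb)

lemma map_range_set {α : Type} (n : Nat) (f : Nat → α) (i : Nat) (_hi : i < n) (v : α) :
    ((List.range n).map f).set i v = (List.range n).map (fun a => if a = i then v else f a) := by
  apply List.ext_getElem
  · simp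
  · intro a h1 h2
    simp only [List.getElem_set, List.getElem_map, List.getElem_range]
    by_cases h : i = a
    · subst h; simp
    · rw [if_neg h, if_neg (fun hc => h hc.symm)]

lemma map_range_getD {α : Type} (n : Nat) (f : Nat → α) (i : Nat) (hi : i < n) (d : α) :
    ((List.range n).map f).getD i d = f i := by
  rw [List.getD_eq_getElem _ _ (by simpa using hi)]
  simp

-- one double write m[i][j] := v; m[j][i] := v on a matrix in pvMat form (A's loop body)
lemma pvStep (n : Nat) (φ : Nat → Nat → Int) (i j : Nat) (hi : i < n) (hj : j < n) (v : Int) :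
    PySem.List.pySetD
      (PySem.List.pySetD (pvMat n φ) (i : Int)
        (PySem.List.pySetD (PySem.List.pyGetD (pvMat n φ) (i : Int) []) (j : Int) v)) (j : Int)
      (PySem.List.pySetD
        (PySem.List.pyGetD
          (PySem.List.pySetD (pvMat n φ) (i : Int)
            (PySem.List.pySetD (PySem.List.pyGetD (pvMat n φ) (i : Int) []) (j : Int) v))
          (j : Int) []) (i : Int) v)
    = pvMat n (fun a b => if (a = i ∧ b = j) ∨ (a = j ∧ b = i) then v else φ a b) := by
  simp only [PySem.List.pySetD_natCast, PySem.List.pyGetD_natCast]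
  have hM : pvMat n φ = (List.range n).map (fun a => (List.range n).map (φ a)) := rfl
  have hr1 : ((pvMat n φ).getD i []).set j v
      = (List.range n).map (fun b => if b = j then v else φ i b) := by
    rw [hM, map_range_getD n _ i hi, map_range_set n _ j hj]
  have hM1 : (pvMat n φ).set i (((pvMat n φ).getD i []).set j v)
      = (List.range n).map (fun a => if a = i
          then (List.range n).map (fun b => if b = j then v else φ i b)
          else (List.range n).map (φ a)) := by
    rw [hr1, hM, map_range_set n _ i hi]
  rw [hM1]
  have hgetD : ((List.range n).map (fun a => if a = i
        then (List.range n).map (fun b => if b = j then v else φ i b)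
        else (List.range n).map (φ a))).getD j []
      = if j = i then (List.range n).map (fun b => if b = j then v else φ i b)
        else (List.range n).map (φ j) :=
    map_range_getD n _ j hj []
  rw [hgetD]
  by_cases hji : j = i
  · rw [if_pos hji, map_range_set n _ i hi, map_range_set n _ j hj]
    unfold pvMat
    apply List.map_congr_left
    intro x _
    dsimp only
    split_ifs <;>
      (apply List.map_congr_left; intro y _; dsimp only;
       split_ifs <;> subst_vars <;> first | rfl | (exfalso; omega))
  · rw [if_neg hji, map_range_set n _ i hi, map_range_set n _ j hj]
    unfold pvMat
    apply List.map_congr_left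
    intro x _
    dsimp only
    split_ifs <;>
      (apply List.map_congr_left; intro y _; dsimp only;
       split_ifs <;> subst_vars <;> first | rfl | (exfalso; omega))

-- A's inner loop over colone ∈ range(s, n), for row i
lemma pvInner (reseau : List (List Int)) (n : Nat) (i : Nat) (hi : i < n) :
    ∀ (t s : Nat), s + t = n → i ≤ s → ∀ (φ : Nat → Nat → Int),
    (PySem.List.pyRange (s : Int) (n : Int) 1).foldl (fun m colone =>
      let amis_commun := trouver_nombre_elements_communs_entre_listes
        (PySem.List.pyGetD reseau (i : Int) []) (PySem.List.pyGetD reseau colone [])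
      let m := PySem.List.pySetD m (i : Int)
        (PySem.List.pySetD (PySem.List.pyGetD m (i : Int) []) colone amis_commun)
      PySem.List.pySetD m colone
        (PySem.List.pySetD (PySem.List.pyGetD m colone []) (i : Int) amis_commun)) (pvMat n φ)
    = pvMat n (fun a b =>
        if (a = i ∧ s ≤ b) ∨ (b = i ∧ s ≤ a) then pvSim reseau a b else φ a b) := by
  intro t
  induction t with
  | zero =>
    intro s hs _ φ
    have h0 : (s : Int) = (n : Int) := by omega
    have he : PySem.List.pyRange (s : Int) (n : Int) 1 = [] := by
      rw [h0, PySem.List.pyRange_one]; simp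
    rw [he, List.foldl_nil]
    apply pvMat_congr
    intro a b ha hb
    rw [if_neg (by omega)]
  | succ t ih =>
    intro s hs his φ
    have hsn : (s : Int) < (n : Int) := by omega
    rw [PySem.List.pyRange_one_cons hsn, List.foldl_cons]
    have hamis : trouver_nombre_elements_communs_entre_listes
        (PySem.List.pyGetD reseau (i : Int) []) (PySem.List.pyGetD reseau (s : Int) [])
        = pvSim reseau i s := by
      simp [trouver_nombre_elements_communs_entre_listes, pvSim,
        PySem.List.pyGetD_natCast]
    show (PySem.List.pyRange ((s : Int) + 1) (n : Int) 1).foldl _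
        (PySem.List.pySetD
          (PySem.List.pySetD (pvMat n φ) (i : Int)
            (PySem.List.pySetD (PySem.List.pyGetD (pvMat n φ) (i : Int) []) (s : Int)
              (trouver_nombre_elements_communs_entre_listes
                (PySem.List.pyGetD reseau (i : Int) []) (PySem.List.pyGetD reseau (s : Int) []))))
          (s : Int)
          (PySem.List.pySetD
            (PySem.List.pyGetD
              (PySem.List.pySetD (pvMat n φ) (i : Int)
                (PySem.List.pySetD (PySem.List.pyGetD (pvMat n φ) (i : Int) []) (s : Int)
                  (trouver_nombre_elements_communs_entre_listes
                    (PySem.List.pyGetD reseau (i : Int) [])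
                    (PySem.List.pyGetD reseau (s : Int) []))))
              (s : Int) []) (i : Int)
            (trouver_nombre_elements_communs_entre_listes
              (PySem.List.pyGetD reseau (i : Int) []) (PySem.List.pyGetD reseau (s : Int) []))))
      = _
    rw [hamis, pvStep n φ i s hi (by omega) (pvSim reseau i s)]
    have hc : ((s : Int) + 1) = ((s + 1 : Nat) : Int) := by push_cast; ring
    rw [hc, ih (s + 1) (by omega) (by omega)]
    apply pvMat_congr
    intro a b ha hb
    by_cases h1 : (a = i ∧ s + 1 ≤ b) ∨ (b = i ∧ s + 1 ≤ a)
    · rw [if_pos h1, if_pos (by omega : (a = i ∧ s ≤ b) ∨ (b = i ∧ s ≤ a))]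
    · rw [if_neg h1]
      by_cases h2 : (a = i ∧ b = s) ∨ (a = s ∧ b = i)
      · rw [if_pos h2, if_pos (by omega : (a = i ∧ s ≤ b) ∨ (b = i ∧ s ≤ a))]
        rcases h2 with ⟨h2a, h2b⟩ | ⟨h2a, h2b⟩
        · rw [h2a, h2b]
        · rw [h2a, h2b]
          exact pvSim_symm reseau i s
      · rw [if_neg h2, if_neg (by omega : ¬ ((a = i ∧ s ≤ b) ∨ (b = i ∧ s ≤ a)))]

-- A's outer loop over ligne ∈ range(s, n)  (the port runs it with s = 0)
lemma pvOuter (reseau : List (List Int)) (n : Nat) :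
    ∀ (t s : Nat), s + t = n → ∀ (φ : Nat → Nat → Int),
    (PySem.List.pyRange (s : Int) (n : Int) 1).foldl (fun m ligne =>
      (PySem.List.pyRange ligne (n : Int) 1).foldl (fun m colone =>
        let amis_commun := trouver_nombre_elements_communs_entre_listes
          (PySem.List.pyGetD reseau ligne []) (PySem.List.pyGetD reseau colone [])
        let m := PySem.List.pySetD m ligne
          (PySem.List.pySetD (PySem.List.pyGetD m ligne []) colone amis_commun)
        PySem.List.pySetD m colone
          (PySem.List.pySetD (PySem.List.pyGetD m colone []) ligne amis_commun)) m) (pvMat n φ)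
    = pvMat n (fun a b => if s ≤ a ∧ s ≤ b then pvSim reseau a b else φ a b) := by
  intro t
  induction t with
  | zero =>
    intro s hs φ
    have h0 : (s : Int) = (n : Int) := by omega
    have he : PySem.List.pyRange (s : Int) (n : Int) 1 = [] := by
      rw [h0, PySem.List.pyRange_one]; simp
    rw [he, List.foldl_nil]
    apply pvMat_congr
    intro a b ha hb
    rw [if_neg (by omega)]
  | succ t ih =>
    intro s hs φ
    have hsn : (s : Int) < (n : Int) := by omega
    rw [PySem.List.pyRange_one_cons hsn, List.foldl_cons]
    show (PySem.List.pyRange ((s : Int) + 1) (n : Int) 1).foldl _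
        ((PySem.List.pyRange (s : Int) (n : Int) 1).foldl _ (pvMat n φ)) = _
    rw [pvInner reseau n s (by omega) (n - s) s (by omega) le_rfl φ]
    have hc : ((s : Int) + 1) = ((s + 1 : Nat) : Int) := by push_cast; ring
    rw [hc, ih (s + 1) (by omega)]
    apply pvMat_congr
    intro a b ha hb
    split_ifs <;> first | rfl | (exfalso; omega)

-- the zero-appending inner loop of initialiser_matrice_carre, in List.set form
lemma pvZeroRow (l : List Int) : ∀ (pre : List (List Int)) (row : List Int),
    l.foldl (fun m (_ : Int) => m.set pre.length (m.getD pre.length [] ++ [0])) (pre ++ [row])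
    = pre ++ [row ++ List.replicate l.length 0] := by
  induction l with
  | nil => intro pre row; simp
  | cons x xs ih =>
    intro pre row
    simp only [List.foldl_cons]
    rw [show (pre ++ [row]).getD pre.length [] = row by simp [List.getD],
        show (pre ++ [row]).set pre.length (row ++ [0]) = pre ++ [row ++ [0]] by simp,
        ih pre (row ++ [0])]
    simp [List.replicate_succ]

lemma pvInnerZeros (l : List Int) (pre : List (List Int)) (row : List Int) :
    l.foldl (fun m _ =>
      PySem.List.pySetD m (pre.length : Int) (PySem.List.pyGetD m (pre.length : Int) [] ++ [0]))
      (pre ++ [row])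
    = pre ++ [row ++ List.replicate l.length 0] := by
  simp only [PySem.List.pySetD_natCast, PySem.List.pyGetD_natCast]
  exact pvZeroRow l pre row

lemma pvInitAux (n : Nat) : ∀ (s : Nat), s ≤ n →
    (PySem.List.pyRange 0 (s : Int) 1).foldl (fun matrice ligne =>
      let matrice := matrice ++ [([] : List Int)]
      (PySem.List.pyRange 0 (n : Int) 1).foldl (fun m _colonne =>
        PySem.List.pySetD m ligne (PySem.List.pyGetD m ligne [] ++ [0]))
        matrice) []
    = List.replicate s (List.replicate n 0) := by
  intro s
  induction s with
  | zero =>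
    intro _
    have he : PySem.List.pyRange 0 ((0 : Nat) : Int) 1 = [] := by
      rw [PySem.List.pyRange_one]; simp
    rw [he, List.foldl_nil, List.replicate_zero]
  | succ k ih =>
    intro hk
    have h1 : ((k + 1 : Nat) : Int) = (k : Int) + 1 := by push_cast; ring
    rw [h1, PySem.List.pyRange_one_succ_right (by positivity), List.foldl_append,
        ih (by omega)]
    simp only [List.foldl_cons, List.foldl_nil]
    have h3 := pvInnerZeros (PySem.List.pyRange 0 (n : Int) 1)
      (List.replicate k (List.replicate n 0)) []
    simp only [List.length_replicate] at h3
    rw [h3]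
    simp [PySem.List.length_pyRange_one, List.replicate_succ']

lemma pvInit (n : Nat) :
    initialiser_matrice_carre (n : Int) = pvMat n (fun _ _ => 0) := by
  rw [initialiser_matrice_carre, pvInitAux n n le_rfl]
  simp [pvMat, List.map_const']

lemma pvA (reseau : List (List Int)) :
    calculer_scores_similarite reseau = pvMat reseau.length (pvSim reseau) := by
  unfold calculer_scores_similarite
  dsimp only
  rw [PySem.List.len_eq, pvInit reseau.length,
    show ((0 : Int)) = ((0 : Nat) : Int) by norm_num,
    pvOuter reseau reseau.length reseau.length 0 (by omega)]
  apply pvMat_congr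
  intro a b ha hb
  rw [if_pos (by omega)]

-- ===================== B-side lemmas =====================

-- ascending list of users whose friend list contains f
def pvUsers (reseau : List (List Int)) (f : Int) : List Int :=
  ((List.range reseau.length).filter (fun u => decide (f ∈ reseau.getD u []))).map
    (fun u : Nat => (u : Int))

-- inner dict loop over one deduplicated friend list: appends u to each friend's list
lemma pvIdxRow (u : Int) : ∀ (l : List Int), l.Nodup → ∀ (d : PySem.Dict Int (List Int)) (f : Int),
    (l.foldl (fun d g => d.insert g (d.getD g [] ++ [u])) d).getD f []
    = d.getD f [] ++ (if f ∈ l then [u] else []) := by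
  intro l
  induction l with
  | nil => intro _ d f; simp
  | cons g l ih =>
    intro hnd d f
    simp only [List.foldl_cons]
    rw [ih hnd.of_cons]
    by_cases hfg : f = g
    · subst hfg
      rw [PySem.Dict.getD_insert_self]
      have : f ∉ l := (List.nodup_cons.mp hnd).1
      simp [this]
    · rw [PySem.Dict.getD_insert_of_ne _ _ _ hfg]
      simp [hfg]

lemma pvIdxRow_keys (u : Int) (l : List Int) (d : PySem.Dict Int (List Int)) :
    (l.foldl (fun d g => d.insert g (d.getD g [] ++ [u])) d).keys
    = PySem.Set.update d.keys l :=
  PySem.Dict.keys_foldl_insert l _ d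

-- the whole index-building loop over enumerate reseau s
lemma pvIdx (rows : List (List Int)) : ∀ (s : Nat) (d : PySem.Dict Int (List Int)) (f : Int),
    ((PySem.List.enumerate rows (s : Int)).foldl (fun d p =>
      (PySem.List.dedup p.2).foldl (fun d g => d.insert g (d.getD g [] ++ [p.1])) d) d).getD f []
    = d.getD f [] ++ ((List.range rows.length).filter (fun u => decide (f ∈ rows.getD u []))).map
        (fun u => ((s + u : Nat) : Int)) := by
  induction rows with
  | nil => intro s d f; simp [PySem.List.enumerate]
  | cons r rows ih =>
    intro s d f
    rw [PySem.List.enumerate_cons, List.foldl_cons]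
    have hs1 : (s : Int) + 1 = ((s + 1 : Nat) : Int) := by push_cast; ring
    rw [hs1, ih (s + 1)]
    rw [pvIdxRow (s : Int) (PySem.List.dedup r) (PySem.List.nodup_dedup r) d f]
    simp only [List.length_cons, List.range_succ_eq_map, List.filter_cons,
      List.getD_cons_zero, List.filter_map, List.map_map]
    have hmap : List.map ((fun u : Nat => ((s + u : Nat) : Int)) ∘ Nat.succ)
        (((List.range rows.length).filter
          ((fun u => decide (f ∈ (r :: rows).getD u [])) ∘ Nat.succ)))
        = List.map (fun u : Nat => ((s + 1 + u : Nat) : Int))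
          ((List.range rows.length).filter (fun u => decide (f ∈ rows.getD u []))) := by
      have hpred : ((fun u => decide (f ∈ (r :: rows).getD u [])) ∘ Nat.succ)
          = (fun u => decide (f ∈ rows.getD u [])) := by
        funext u; simp [Function.comp]
      rw [hpred]
      apply List.map_congr_left
      intro x _
      simp only [Function.comp]
      exact congrArg _ (by omega)
    by_cases hf : f ∈ r
    · rw [if_pos (by simpa [PySem.List.mem_dedup] using hf), if_pos (by simpa using hf)]
      simp only [List.map_cons, List.map_map, hmap]
      simp [List.append_assoc]
    · rw [if_neg (by simpa [PySem.List.mem_dedup] using hf), if_neg (by simpa using hf)]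
      rw [List.map_map, hmap]
      simp

-- keys of the index: nodup, and exactly the friends occurring somewhere
lemma pvIdx_keys (rows : List (List Int)) : ∀ (s : Int) (d : PySem.Dict Int (List Int)),
    d.keys.Nodup →
    (((PySem.List.enumerate rows s).foldl (fun d p =>
      (PySem.List.dedup p.2).foldl (fun d g => d.insert g (d.getD g [] ++ [p.1])) d) d).keys.Nodup
    ∧ ∀ f, f ∈ ((PySem.List.enumerate rows s).foldl (fun d p =>
      (PySem.List.dedup p.2).foldl (fun d g => d.insert g (d.getD g [] ++ [p.1])) d) d).keys
      ↔ (f ∈ d.keys ∨ ∃ r ∈ rows, f ∈ r)) := by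
  induction rows with
  | nil =>
    intro s d hnd
    constructor
    · simpa [PySem.List.enumerate] using hnd
    · intro f; simp [PySem.List.enumerate]
  | cons r rows ih =>
    intro s d hnd
    rw [PySem.List.enumerate_cons, List.foldl_cons]
    have h1 := pvIdxRow_keys (s : Int) (PySem.List.dedup r) d
    have hnd1 : (((PySem.List.dedup r).foldl (fun d g => d.insert g (d.getD g [] ++ [s])) d).keys).Nodup := by
      rw [h1]; exact PySem.Set.nodup_update _ _ hnd
    obtain ⟨h2, h3⟩ := ih (s + 1) _ hnd1
    refine ⟨h2, fun f => ?_⟩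
    rw [h3 f, h1, PySem.Set.mem_update, PySem.List.mem_dedup]
    constructor
    · rintro ((h | h) | h)
      · exact Or.inl h
      · exact Or.inr ⟨r, by simp, h⟩
      · obtain ⟨r', hr', hf⟩ := h
        exact Or.inr ⟨r', by simp [hr'], hf⟩
    · rintro (h | ⟨r', hr', hf⟩)
      · exact Or.inl (Or.inl h)
      · rcases List.mem_cons.mp hr' with h | h
        · subst h; exact Or.inl (Or.inr hf)
        · exact Or.inr ⟨r', h, hf⟩

-- one increment m[i][j] += 1 on a matrix in pvMat form
lemma pvInc (n : Nat) (φ : Nat → Nat → Int) (i j : Nat) (hi : i < n) (hj : j < n) :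
    PySem.List.pySetD (pvMat n φ) (i : Int)
      (PySem.List.pySetD (PySem.List.pyGetD (pvMat n φ) (i : Int) []) (j : Int)
        (PySem.List.pyGetD (PySem.List.pyGetD (pvMat n φ) (i : Int) []) (j : Int) 0 + 1))
    = pvMat n (fun a b => if a = i ∧ b = j then φ a b + 1 else φ a b) := by
  simp only [PySem.List.pySetD_natCast, PySem.List.pyGetD_natCast]
  have hM : pvMat n φ = (List.range n).map (fun a => (List.range n).map (φ a)) := rfl
  rw [hM, map_range_getD n _ i hi, map_range_getD n _ j hj, map_range_set n _ j hj,
    map_range_set n _ i hi]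
  unfold pvMat
  apply List.map_congr_left
  intro a _
  dsimp only
  split_ifs with h
  · subst h
    apply List.map_congr_left
    intro b _
    dsimp only
    split_ifs <;> simp_all
  · apply List.map_congr_left
    intro b _
    dsimp only
    rw [if_neg (by tauto)]

-- B's innermost loop: for j in us: m[i][j] += 1, for a fixed in-range i
lemma pvJloop (n : Nat) (i : Nat) (hi : i < n) :
    ∀ (us : List Int), (∀ x ∈ us, 0 ≤ x ∧ x < (n : Int)) → ∀ (φ : Nat → Nat → Int),
    us.foldl (fun m j =>
      PySem.List.pySetD m (i : Int)
        (PySem.List.pySetD (PySem.List.pyGetD m (i : Int) []) j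
          (PySem.List.pyGetD (PySem.List.pyGetD m (i : Int) []) j 0 + 1))) (pvMat n φ)
    = pvMat n (fun a b => if a = i then φ a b + (us.count (b : Int) : Int) else φ a b) := by
  intro us
  induction us with
  | nil =>
    intro _ φ
    rw [List.foldl_nil]
    apply pvMat_congr
    intro a b _ _
    split_ifs <;> simp
  | cons j us ih =>
    intro hbd φ
    obtain ⟨hj0, hjn⟩ := hbd j (by simp)
    have hj : j = ((j.toNat : Nat) : Int) := (Int.toNat_of_nonneg hj0).symm
    rw [List.foldl_cons, hj,
      pvInc n φ i j.toNat hi (by omega),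
      ih (fun x hx => hbd x (by simp [hx]))]
    apply pvMat_congr
    intro a b ha hb
    by_cases hai : a = i
    · subst hai
      rw [if_pos rfl, if_pos rfl]
      rw [List.count_cons]
      by_cases hbj : (b : Int) = ((j.toNat : Nat) : Int)
      · rw [if_pos ⟨rfl, by omega⟩]
        simp only [hbj, beq_self_eq_true, if_true]
        push_cast
        ring
      · rw [if_neg (by
          rintro ⟨-, h⟩
          exact hbj (by omega))]
        have : ¬ ((j.toNat : Int) == (b : Int)) = true := by
          simp only [beq_iff_eq]
          exact fun h => hbj h.symm
        simp only [this]
        push_cast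
        ring
    · rw [if_neg hai, if_neg (by tauto), if_neg hai]

-- B's middle loop: for i in iter: for j in us: m[i][j] += 1
lemma pvIloop (n : Nat) (us : List Int) (hus : ∀ x ∈ us, 0 ≤ x ∧ x < (n : Int)) :
    ∀ (iter : List Int), (∀ x ∈ iter, 0 ≤ x ∧ x < (n : Int)) → ∀ (φ : Nat → Nat → Int),
    iter.foldl (fun m i =>
      us.foldl (fun m j =>
        PySem.List.pySetD m i
          (PySem.List.pySetD (PySem.List.pyGetD m i []) j
            (PySem.List.pyGetD (PySem.List.pyGetD m i []) j 0 + 1))) m) (pvMat n φ)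
    = pvMat n (fun a b => φ a b + (iter.count (a : Int) : Int) * (us.count (b : Int) : Int)) := by
  intro iter
  induction iter with
  | nil =>
    intro _ φ
    rw [List.foldl_nil]
    apply pvMat_congr
    intro a b _ _
    simp
  | cons i iter ih =>
    intro hbd φ
    obtain ⟨hi0, hin⟩ := hbd i (by simp)
    have hi : i = ((i.toNat : Nat) : Int) := (Int.toNat_of_nonneg hi0).symm
    rw [List.foldl_cons, hi,
      pvJloop n i.toNat (by omega) us hus φ,
      ih (fun x hx => hbd x (by simp [hx]))]
    apply pvMat_congr
    intro a b ha hb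
    rw [List.count_cons]
    by_cases hai : a = i.toNat
    · subst hai
      rw [if_pos rfl]
      simp only [beq_self_eq_true, if_true]
      push_cast
      ring
    · rw [if_neg hai]
      have : ¬ ((i.toNat : Int) == (a : Int)) = true := by
        simp only [beq_iff_eq]
        intro h
        exact hai (by omega)
      simp only [this, if_false]
      push_cast
      ring

-- B's accumulation over all user lists of the index
lemma pvLloop (n : Nat) :
    ∀ (L : List (List Int)), (∀ us ∈ L, ∀ x ∈ us, 0 ≤ x ∧ x < (n : Int)) →
    ∀ (φ : Nat → Nat → Int),
    L.foldl (fun m us =>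
      us.foldl (fun m i =>
        us.foldl (fun m j =>
          PySem.List.pySetD m i
            (PySem.List.pySetD (PySem.List.pyGetD m i []) j
              (PySem.List.pyGetD (PySem.List.pyGetD m i []) j 0 + 1))) m) m) (pvMat n φ)
    = pvMat n (fun a b => φ a b
        + (L.map (fun us => (us.count (a : Int) : Int) * (us.count (b : Int) : Int))).sum) := by
  intro L
  induction L with
  | nil =>
    intro _ φ
    rw [List.foldl_nil]
    apply pvMat_congr
    intro a b _ _
    simp
  | cons us L ih =>
    intro hbd φ
    have hus := hbd us (by simp)
    rw [List.foldl_cons,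
      pvIloop n us hus us hus φ,
      ih (fun v hv => hbd v (by simp [hv]))]
    apply pvMat_congr
    intro a b _ _
    simp only [List.map_cons, List.sum_cons]
    ring

-- count of a user in pvUsers is the membership indicator
lemma pvUsers_count (reseau : List (List Int)) (f : Int) (a : Nat) (ha : a < reseau.length) :
    ((pvUsers reseau f).count (a : Int) : Int)
    = if f ∈ reseau.getD a [] then 1 else 0 := by
  have hinj : Function.Injective (fun u : Nat => (u : Int)) := fun x y h => by simpa using h
  have h2 : (pvUsers reseau f).count (a : Int)
      = ((List.range reseau.length).filter (fun u => decide (f ∈ reseau.getD u []))).count a := by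
    unfold pvUsers
    exact List.count_map_of_injective _ _ hinj a
  rw [h2]
  by_cases hf : f ∈ reseau.getD a []
  · rw [if_pos hf, List.count_eq_one_of_mem (List.nodup_range.filter _)
      (List.mem_filter.mpr ⟨List.mem_range.mpr ha, by simpa using hf⟩)]
    simp
  · rw [if_neg hf, List.count_eq_zero.mpr
      (fun hmem => hf (by simpa using (List.mem_filter.mp hmem).2))]
    simp

lemma pvB (reseau : List (List Int)) :
    calculer_scores_similarite_alt reseau = pvMat reseau.length (pvSim reseau) := by
  unfold calculer_scores_similarite_alt
  dsimp only
  set n := reseau.length with hn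
  set D := (PySem.List.enumerate reseau 0).foldl (fun d p =>
      (PySem.List.dedup p.2).foldl (fun d g => d.insert g (d.getD g [] ++ [p.1])) d)
    (PySem.Dict.empty : PySem.Dict Int (List Int)) with hD
  -- index lookups
  have hget : ∀ f, D.getD f [] = pvUsers reseau f := by
    intro f
    rw [hD, show (0 : Int) = ((0 : Nat) : Int) from rfl, pvIdx reseau 0 _ f]
    rw [PySem.Dict.getD_empty]
    unfold pvUsers
    simp only [List.nil_append, Nat.zero_add]
  have hkeys := pvIdx_keys reseau 0 PySem.Dict.empty (by simp [PySem.Dict.keys_empty])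
  have hknd : D.keys.Nodup := hkeys.1
  have hkmem : ∀ f, f ∈ D.keys ↔ ∃ r ∈ reseau, f ∈ r := by
    intro f
    rw [hkeys.2 f]
    simp [PySem.Dict.keys_empty]
  -- initial matrix
  have hinit : (PySem.List.pyRange 0 (PySem.List.len reseau) 1).map
      (fun _ => List.replicate (PySem.List.len reseau).toNat 0) = pvMat n (fun _ _ => 0) := by
    rw [PySem.List.len_eq]
    rw [List.map_const']
    simp only [PySem.List.length_pyRange_one]
    unfold pvMat
    rw [List.map_const', List.map_const']
    simp [hn]
  rw [hinit]
  -- values as a map over keys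
  have hvals : D.values = D.keys.map (fun f => pvUsers reseau f) := by
    rw [PySem.Dict.values_eq_map_keys D hknd []]
    apply List.map_congr_left
    intro f _
    exact hget f
  -- bounds
  have hbd : ∀ us ∈ D.values, ∀ x ∈ us, 0 ≤ x ∧ x < (n : Int) := by
    intro us hus x hx
    rw [hvals] at hus
    obtain ⟨f, -, rfl⟩ := List.mem_map.mp hus
    unfold pvUsers at hx
    obtain ⟨u, hu, rfl⟩ := List.mem_map.mp hx
    have := List.mem_range.mp (List.mem_filter.mp hu).1
    omega
  rw [pvLloop n D.values hbd (fun _ _ => 0)]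
  apply pvMat_congr
  intro a b ha hb
  rw [hvals, List.map_map]
  have hsum : ((D.keys.map ((fun us => ((us.count (a : Int) : Nat) : Int)
        * ((us.count (b : Int) : Nat) : Int)) ∘ fun f => pvUsers reseau f))).sum
      = (D.keys.map (fun f =>
          if f ∈ reseau.getD a [] ∧ f ∈ reseau.getD b [] then (1 : Int) else 0)).sum := by
    apply congrArg
    apply List.map_congr_left
    intro f _
    simp only [Function.comp]
    rw [pvUsers_count reseau f a ha, pvUsers_count reseau f b hb]
    split_ifs <;> simp_all
  rw [hsum]
  -- 0/1 sum is a countP; countP over nodup keys = length of the intersection set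
  have hfilter : (D.keys.filter (fun f =>
        decide (f ∈ reseau.getD a []) && decide (f ∈ reseau.getD b []))).Perm
      (PySem.Set.inter (PySem.Set.ofList (reseau.getD a []))
        (PySem.Set.ofList (reseau.getD b []))) := by
    rw [List.perm_ext_iff_of_nodup (hknd.filter _)
      (PySem.Set.nodup_inter _ _ (PySem.Set.nodup_ofList _))]
    intro f
    rw [List.mem_filter, PySem.Set.mem_inter, PySem.Set.mem_ofList, PySem.Set.mem_ofList]
    constructor
    · rintro ⟨-, h⟩
      simpa using h
    · rintro ⟨h1, h2⟩
      refine ⟨?_, by simp only [Bool.and_eq_true, decide_eq_true_eq]; exact ⟨h1, h2⟩⟩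
      rw [hkmem]
      have hmem : reseau.getD a [] ∈ reseau := by
        rw [List.getD_eq_getElem _ _ (by omega : a < reseau.length)]
        exact List.getElem_mem _
      exact ⟨reseau.getD a [], hmem, h1⟩
  have hsum2 : (D.keys.map (fun f =>
      if f ∈ reseau.getD a [] ∧ f ∈ reseau.getD b [] then (1 : Int) else 0)).sum
      = ((D.keys.countP (fun f =>
          decide (f ∈ reseau.getD a []) && decide (f ∈ reseau.getD b []))) : Int) := by
    rw [List.countP_eq_length_filter]
    induction D.keys with
    | nil => simp
    | cons k ks ihk =>
      simp only [List.map_cons, List.sum_cons, List.filter_cons]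
      by_cases h : k ∈ reseau.getD a [] ∧ k ∈ reseau.getD b []
      · rw [if_pos h, if_pos (by simp only [Bool.and_eq_true, decide_eq_true_eq]; exact h)]
        simp only [List.length_cons]
        push_cast
        rw [ihk]
        ring
      · rw [if_neg h, if_neg (by
          simp only [Bool.and_eq_true, decide_eq_true_eq]
          tauto)]
        rw [ihk]
        ring
  rw [hsum2, List.countP_eq_length_filter, hfilter.length_eq]
  simp only [pvSim, PySem.Set.len]
  ring

-- ===== VERDICT (by name: the statement is the Claim_ definition above) =====
theorem calculer_scores_similarite_spec : Claim_equal_calculer_scores_similarite := by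
  intro reseau _
  unfold Spec_calculer_scores_similarite
  rw [pvA, pvB]
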